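-- pv_equiv track=rewrite | github.com/proteo5/sld | tools/validator.py | _read_until
-- ===== SOURCE A (Python) =====
-- from typing import Any, Dict, List, Optional, Tuple
--
-- ESC = "^"
--
-- def _read_until(s: str, start: int, stops: List[str]) -> Tuple[str, int]:
--     """Read from start until an unescaped char in stops appears.
--
--     Returns (substring_without_terminal, index_of_terminal)
--     The index points to the stop character encountered (or len(s) if none).
--     """
--     i = start
--     buf: List[str] = []
--     while i < len(s):
--         ch = s[i]
--         if ch == ESC:
--             if i + 1 < len(s):
--                 buf.append(s[i:i+2])
--                 i += 2
--                 continue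
--             else:
--                 buf.append(ch)
--                 i += 1
--                 continue
--         if ch in stops:
--             break
--         buf.append(ch)
--         i += 1
--     return "".join(buf), i
-- ===== SOURCE B (Python) =====
-- from typing import List, Tuple
--
-- ESC = "^"
--
-- def _read_until(s: str, start: int, stops: List[str]) -> Tuple[str, int]:
--     """Single index scan with an escape-skip flag; the substring is one slice."""
--     n = len(s)
--     i = max(start, n)
--     skip = False
--     for j in range(start, n):
--         if skip:
--             skip = False
--             continue
--         ch = s[j]
--         if ch == ESC:
--             skip = True
--         elif ch in stops:
--             i = j
--             break
--     return s[start:i], i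
-- ===== Notes on version B (the rewrite author's own statement) =====
-- stated objective: simpler
-- what changed: Replaces the while-loop that accumulates per-character/per-pair buffer pieces and joins them with a for-range scan using a one-shot escape-skip flag that only finds the terminal index, returning a single slice s[start:i].
-- outside the precondition, e.g. on _read_until('abc', -1, ['b']): A returns ('ca', 1), B returns ('', 1)
import Mathlib
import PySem

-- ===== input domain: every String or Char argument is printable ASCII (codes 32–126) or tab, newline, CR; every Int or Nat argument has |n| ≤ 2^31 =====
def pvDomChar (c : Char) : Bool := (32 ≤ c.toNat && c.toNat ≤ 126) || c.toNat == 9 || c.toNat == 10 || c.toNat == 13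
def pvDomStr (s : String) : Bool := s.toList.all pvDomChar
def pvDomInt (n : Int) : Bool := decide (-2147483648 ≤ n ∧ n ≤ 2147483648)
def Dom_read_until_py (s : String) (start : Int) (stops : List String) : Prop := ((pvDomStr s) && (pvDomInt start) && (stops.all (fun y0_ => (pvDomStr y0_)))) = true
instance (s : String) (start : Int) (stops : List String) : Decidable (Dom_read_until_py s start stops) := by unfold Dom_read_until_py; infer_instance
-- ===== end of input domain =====

-- B drops A's per-piece buffer + join: it only finds the terminal index with a range
-- scan and an escape-skip flag, and returns one slice (objective: simpler).

-- ===== PORT A =====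
-- while i < len(s): … ; escaped pairs / chars are appended to buf, joined at the end.
def read_until_py_go (cs : List Char) (stops : List String) (i : Int) (buf : List (List Char)) :
    List (List Char) × Int :=
  if _h : i < (cs.length : Int) then
    match PySem.List.pyGet? cs i with
    | none => (buf, i)   -- Python raises IndexError here (i < -len); outside Pre_
    | some ch =>
      if ch = '^' then
        if i + 1 < (cs.length : Int) then
          read_until_py_go cs stops (i + 2) (buf ++ [PySem.List.slice cs (some i) (some (i + 2))])
        else
          read_until_py_go cs stops (i + 1) (buf ++ [[ch]])
      else if stops.contains (String.ofList [ch]) then (buf, i)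
      else read_until_py_go cs stops (i + 1) (buf ++ [[ch]])
  else (buf, i)
termination_by ((cs.length : Int) - i).toNat
decreasing_by all_goals omega

def read_until_py (s : String) (start : Int) (stops : List String) : String × Int :=
  let cs := s.toList
  let r := read_until_py_go cs stops start []
  (String.ofList (PySem.Chars.join [] r.1), r.2)

-- ===== PORT B =====
-- for j in range(start, n) with a skip flag; returns the index of the stop (break), none otherwise.
def read_until_py_alt_go (cs : List Char) (stops : List String) : List Int → Bool → Option Int
  | [], _ => none
  | j :: rest, skip =>
    if skip then read_until_py_alt_go cs stops rest false
    else
      match PySem.List.pyGet? cs j with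
      | none => none   -- Python raises IndexError here (j < -len); outside Pre_
      | some ch =>
        if ch = '^' then read_until_py_alt_go cs stops rest true
        else if stops.contains (String.ofList [ch]) then some j
        else read_until_py_alt_go cs stops rest false

def read_until_py_alt (s : String) (start : Int) (stops : List String) : String × Int :=
  let cs := s.toList
  let n : Int := cs.length
  let i := (read_until_py_alt_go cs stops (PySem.List.pyRange start n 1) false).getD (max start n)
  (String.ofList (PySem.List.slice cs (some start) (some i)), i)

-- ===== PRECONDITION & SPEC =====
-- Pre_ excludes negative start, on which Python's negative-index wraparound makes A re-read
-- characters from the end of the string (an accident of s[i]; A raises IndexError when start < -len,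
-- and B raises there too).
def Pre_read_until_py (s : String) (start : Int) (stops : List String) : Prop := 0 ≤ start
instance (s : String) (start : Int) (stops : List String) : Decidable (Pre_read_until_py s start stops) := by unfold Pre_read_until_py; infer_instance

def pvWitness_read_until_py : String × Int × List String := ("ab^,c,d", 1, [",", ";"])

def Spec_read_until_py (s : String) (start : Int) (stops : List String) (out : String × Int) : Prop := out = read_until_py_alt s start stops
instance (s : String) (start : Int) (stops : List String) (out : String × Int) : Decidable (Spec_read_until_py s start stops out) := by unfold Spec_read_until_py; infer_instance

-- ===== CLAIM (what is proved, stated in full; the proofs are below) =====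
def Claim_equal_read_until_py : Prop := ∀ (s : String) (start : Int) (stops : List String), Dom_read_until_py s start stops → Pre_read_until_py s start stops → Spec_read_until_py s start stops (read_until_py s start stops)

-- ===== LEMMAS AND PROOFS =====

-- B's terminal index: the stop index if found, else max start n.
def pvJB (cs : List Char) (stops : List String) (i : Int) : Int :=
  (read_until_py_alt_go cs stops (PySem.List.pyRange i (cs.length : Int) 1) false).getD
    (max i (cs.length : Int))

lemma pvJoinNil_cons (a : List Char) (l : List (List Char)) :
    PySem.Chars.join [] (a :: l) = a ++ PySem.Chars.join [] l := by
  cases l with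
  | nil => simp [PySem.Chars.join_singleton, PySem.Chars.join_nil]
  | cons b t => simp [PySem.Chars.join_cons_cons]

lemma pv_goB_mem (cs : List Char) (stops : List String) :
    ∀ (l : List Int) (skip : Bool) (j : Int),
      read_until_py_alt_go cs stops l skip = some j → j ∈ l := by
  intro l
  induction l with
  | nil => intro skip j h; simp [read_until_py_alt_go] at h
  | cons x rest ih =>
    intro skip j h
    simp only [read_until_py_alt_go] at h
    split at h
    · exact List.mem_cons_of_mem _ (ih _ _ h)
    · split at h
      · simp at h
      · split_ifs at h with h1 h2
        · exact List.mem_cons_of_mem _ (ih _ _ h)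
        · simp at h; simp [h]
        · exact List.mem_cons_of_mem _ (ih _ _ h)

lemma pvJB_bounds (cs : List Char) (stops : List String) (i : Int)
    (hi : i ≤ (cs.length : Int)) : i ≤ pvJB cs stops i ∧ pvJB cs stops i ≤ (cs.length : Int) := by
  unfold pvJB
  cases hgo : read_until_py_alt_go cs stops (PySem.List.pyRange i (cs.length : Int) 1) false with
  | none => simp; omega
  | some j =>
    have := pv_goB_mem cs stops _ _ _ hgo
    rw [PySem.List.mem_pyRange_one] at this
    simp; omega

lemma pv_slice_nil (cs : List Char) (a : Int) (h : 0 ≤ a) :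
    PySem.List.slice cs (some a) (some a) = [] := by
  rw [PySem.List.slice_toNat cs h h]; simp

lemma pv_slice_one (cs : List Char) (i : Int) (h0 : 0 ≤ i) (h1 : i < (cs.length : Int)) :
    PySem.List.slice cs (some i) (some (i + 1)) = [cs[i.toNat]'(by omega)] := by
  rw [PySem.List.slice_toNat cs h0 (by omega)]
  have h2 : (i + 1).toNat - i.toNat = 1 := by omega
  rw [h2]
  rw [show List.drop i.toNat cs = cs[i.toNat]'(by omega) :: List.drop (i.toNat+1) cs from
    List.drop_eq_getElem_cons (by omega)]
  rw [List.take_succ_cons, List.take_zero]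

lemma pv_slice_mid (cs : List Char) (a m b : Int) (h0 : 0 ≤ a) (h1 : a ≤ m) (h2 : m ≤ b) :
    PySem.List.slice cs (some a) (some m) ++ PySem.List.slice cs (some m) (some b)
      = PySem.List.slice cs (some a) (some b) := by
  rw [PySem.List.slice_toNat cs h0 (by omega), PySem.List.slice_toNat cs (by omega) (by omega),
    PySem.List.slice_toNat cs h0 (by omega)]
  rw [show cs.drop m.toNat = (cs.drop a.toNat).drop (m.toNat - a.toNat) by
    rw [List.drop_drop]; congr 1; omega]
  rw [← List.take_add]
  congr 1; omega

lemma pvJoinNil_append_singleton (buf : List (List Char)) (p : List Char) :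
    PySem.Chars.join [] (buf ++ [p]) = PySem.Chars.join [] buf ++ p := by
  induction buf with
  | nil => simp [PySem.Chars.join_nil, PySem.Chars.join_singleton]
  | cons a t ih => rw [List.cons_append, pvJoinNil_cons, pvJoinNil_cons, ih, List.append_assoc]

lemma pvJB_ge (cs : List Char) (stops : List String) (i : Int) (h : (cs.length : Int) ≤ i) :
    pvJB cs stops i = i := by
  unfold pvJB
  rw [PySem.List.pyRange_one_eq_nil h]
  simp only [read_until_py_alt_go, Option.getD_none]
  omega

lemma pvJB_stop (cs : List Char) (stops : List String) (i : Int) (ch : Char)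
    (hlt : i < (cs.length : Int)) (hg : PySem.List.pyGet? cs i = some ch)
    (hesc : ¬ ch = '^') (hstop : stops.contains (String.ofList [ch]) = true) :
    pvJB cs stops i = i := by
  have hstop' : String.ofList [ch] ∈ stops := by simpa using hstop
  unfold pvJB
  rw [PySem.List.pyRange_one_cons hlt]
  simp [read_until_py_alt_go, hg, hesc, hstop']

lemma pvJB_plain (cs : List Char) (stops : List String) (i : Int) (ch : Char)
    (hlt : i < (cs.length : Int)) (hg : PySem.List.pyGet? cs i = some ch)
    (hesc : ¬ ch = '^') (hstop : ¬ stops.contains (String.ofList [ch]) = true) :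
    pvJB cs stops i = pvJB cs stops (i + 1) := by
  have hstop' : String.ofList [ch] ∉ stops := by simpa using hstop
  unfold pvJB
  rw [PySem.List.pyRange_one_cons hlt]
  have hmax : max i (cs.length : Int) = max (i + 1) (cs.length : Int) := by omega
  simp [read_until_py_alt_go, hg, hesc, hstop', hmax]

lemma pvJB_esc2 (cs : List Char) (stops : List String) (i : Int) (ch : Char)
    (hlt1 : i + 1 < (cs.length : Int)) (hg : PySem.List.pyGet? cs i = some ch)
    (hesc : ch = '^') :
    pvJB cs stops i = pvJB cs stops (i + 2) := by
  unfold pvJB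
  rw [PySem.List.pyRange_one_cons (by omega), PySem.List.pyRange_one_cons hlt1]
  have h2 : i + 1 + 1 = i + 2 := by omega
  have hmax : max i (cs.length : Int) = max (i + 2) (cs.length : Int) := by omega
  simp [read_until_py_alt_go, hg, hesc, h2, hmax]

lemma pvJB_esc1 (cs : List Char) (stops : List String) (i : Int) (ch : Char)
    (hlt : i < (cs.length : Int)) (hlt1 : ¬ i + 1 < (cs.length : Int))
    (hg : PySem.List.pyGet? cs i = some ch) (hesc : ch = '^') :
    pvJB cs stops i = i + 1 := by
  unfold pvJB
  rw [PySem.List.pyRange_one_cons hlt, PySem.List.pyRange_one_eq_nil (by omega)]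
  simp [read_until_py_alt_go, hg, hesc]
  omega

-- main invariant: A's loop from i appends exactly slice cs i J to buf, and ends at J = pvJB i.
lemma pv_main (cs : List Char) (stops : List String) :
    ∀ (k : Nat) (i : Int), ((cs.length : Int) - i).toNat ≤ k → 0 ≤ i →
      ∀ (buf : List (List Char)),
        (read_until_py_go cs stops i buf).2 = pvJB cs stops i ∧
        PySem.Chars.join [] (read_until_py_go cs stops i buf).1
          = PySem.Chars.join [] buf ++ PySem.List.slice cs (some i) (some (pvJB cs stops i)) := by
  intro k
  induction k with
  | zero =>
    intro i hk h0 buf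
    have hge : (cs.length : Int) ≤ i := by omega
    rw [read_until_py_go, dif_neg (by omega), pvJB_ge cs stops i hge, pv_slice_nil cs i h0]
    simp
  | succ k ih =>
    intro i hk h0 buf
    by_cases hlt : i < (cs.length : Int)
    · have hg : PySem.List.pyGet? cs i = some (cs[i.toNat]'(by omega)) := by
        rw [PySem.List.pyGet?_of_nonneg cs h0, List.getElem?_eq_getElem (by omega)]
      by_cases hesc : cs[i.toNat]'(by omega) = '^'
      · by_cases hlt1 : i + 1 < (cs.length : Int)
        · -- escaped pair: consume two characters
          rw [read_until_py_go, dif_pos hlt, hg]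
          simp only [if_pos hesc, if_pos hlt1]
          obtain ⟨ih2, ihj⟩ := ih (i + 2) (by omega) (by omega)
            (buf ++ [PySem.List.slice cs (some i) (some (i + 2))])
          have hJ := pvJB_esc2 cs stops i _ hlt1 hg hesc
          refine ⟨by rw [ih2, hJ], ?_⟩
          rw [ihj, pvJoinNil_append_singleton, hJ, List.append_assoc,
            pv_slice_mid cs i (i + 2) (pvJB cs stops (i + 2)) h0 (by omega)
              (pvJB_bounds cs stops (i + 2) (by omega)).1]
        · -- dangling escape at the end: keep the '^' and stop at len
          rw [read_until_py_go, dif_pos hlt, hg]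
          simp only [if_pos hesc, if_neg hlt1]
          obtain ⟨ih2, ihj⟩ := ih (i + 1) (by omega) (by omega) (buf ++ [[cs[i.toNat]'(by omega)]])
          have hJ := pvJB_esc1 cs stops i _ hlt hlt1 hg hesc
          have hJ1 : pvJB cs stops (i + 1) = i + 1 := pvJB_ge cs stops (i + 1) (by omega)
          refine ⟨by rw [ih2, hJ1, hJ], ?_⟩
          rw [ihj, pvJoinNil_append_singleton, hJ1, pv_slice_nil cs (i + 1) (by omega),
            List.append_nil, hJ, ← pv_slice_one cs i h0 hlt]
      · by_cases hstop : stops.contains (String.ofList [cs[i.toNat]'(by omega)]) = true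
        · -- unescaped stop character: break
          rw [read_until_py_go, dif_pos hlt, hg]
          simp only [if_neg hesc, if_pos hstop]
          have hJ := pvJB_stop cs stops i _ hlt hg hesc hstop
          rw [hJ, pv_slice_nil cs i h0]
          simp
        · -- ordinary character
          rw [read_until_py_go, dif_pos hlt, hg]
          simp only [if_neg hesc, if_neg hstop]
          obtain ⟨ih2, ihj⟩ := ih (i + 1) (by omega) (by omega) (buf ++ [[cs[i.toNat]'(by omega)]])
          have hJ := pvJB_plain cs stops i _ hlt hg hesc hstop
          refine ⟨by rw [ih2, hJ], ?_⟩
          rw [ihj, pvJoinNil_append_singleton, hJ, ← pv_slice_one cs i h0 hlt,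
            List.append_assoc, pv_slice_mid cs i (i + 1) (pvJB cs stops (i + 1)) h0 (by omega)
              (pvJB_bounds cs stops (i + 1) (by omega)).1]
    · have hge : (cs.length : Int) ≤ i := by omega
      rw [read_until_py_go, dif_neg (by omega), pvJB_ge cs stops i hge, pv_slice_nil cs i h0]
      simp

-- ===== VERDICT (by name: the statement is the Claim_ definition above) =====
theorem read_until_py_spec : Claim_equal_read_until_py := by
  intro s start stops _hdom hpre
  unfold Spec_read_until_py read_until_py read_until_py_alt
  dsimp only
  have h := pv_main s.toList stops ((s.toList.length : Int) - start).toNat start le_rfl hpre []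
  simp only [PySem.Chars.join_nil, List.nil_append] at h
  rw [h.1, h.2]
  unfold pvJB
  rfl
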